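-- pv_equiv track=rewrite | github.com/nvando/WINC_Assignments | for/main.py | shortest_names
-- ===== SOURCE A (Python) =====
-- def shortest_names(countries):
--
--     shortest_names_list = []
--     shortest_name_lenght = len(countries[0])
--
--     for country in countries:
--         if len(country) < shortest_name_lenght:
--             shortest_name_lenght = len(country)
--             shortest_names_list = [country]
--         elif len(country) == shortest_name_lenght:
--             shortest_names_list.append(country)
--
--     return shortest_names_list
-- ===== SOURCE B (Python) =====
-- def shortest_names(countries):
--     m = len(countries[0])
--     for country in countries:
--         m = min(m, len(country))
--     return [country for country in countries if len(country) == m]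
-- ===== Notes on version B (the rewrite author's own statement) =====
-- stated objective: simpler
-- what changed: Replaced A's single interleaved scan that maintains and resets a candidate list with a two-pass decomposition: one fold computing the minimum length, then one filter producing the result.
import Mathlib
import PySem

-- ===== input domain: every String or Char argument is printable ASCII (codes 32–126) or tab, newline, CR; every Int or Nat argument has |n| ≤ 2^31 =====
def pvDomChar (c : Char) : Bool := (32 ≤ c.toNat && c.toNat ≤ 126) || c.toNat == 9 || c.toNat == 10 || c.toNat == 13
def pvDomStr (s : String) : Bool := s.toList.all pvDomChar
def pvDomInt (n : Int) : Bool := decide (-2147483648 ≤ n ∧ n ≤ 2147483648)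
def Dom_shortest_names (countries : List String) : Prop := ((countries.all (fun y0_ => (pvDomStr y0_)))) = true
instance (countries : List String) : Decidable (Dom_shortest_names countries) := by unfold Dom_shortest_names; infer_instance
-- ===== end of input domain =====

-- B replaces A's single interleaved scan (maintaining and resetting a candidate list)
-- with a two-pass decomposition: a fold computing the minimum length, then a filter.


-- ===== PORT A =====
-- A's loop: state (shortest_names_list, shortest_name_lenght), initialised from countries[0].
def shortestNamesStep (st : List String × Int) (country : String) : List String × Int :=
  if PySem.Str.len country < st.2 then ([country], PySem.Str.len country)
  else if PySem.Str.len country = st.2 then (st.1 ++ [country], st.2)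
  else st

def shortest_names (countries : List String) : List String :=
  match PySem.List.pyGet? countries 0 with
  | none => []   -- unreachable under Pre_ (Python raises IndexError here)
  | some c0 => (countries.foldl shortestNamesStep ([], PySem.Str.len c0)).1

-- ===== PORT B =====
def shortest_names_alt (countries : List String) : List String :=
  match PySem.List.pyGet? countries 0 with
  | none => []   -- unreachable under Pre_ (Python raises IndexError here)
  | some c0 =>
    let m := countries.foldl (fun m country => min m (PySem.Str.len country)) (PySem.Str.len c0)
    countries.filter (fun country => PySem.Str.len country = m)

-- ===== PRECONDITION & SPEC =====
-- A indexes countries[0], so it raises IndexError on the empty list; Pre_ excludes exactly that.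
def Pre_shortest_names (countries : List String) : Prop := countries ≠ []
instance (countries : List String) : Decidable (Pre_shortest_names countries) := by unfold Pre_shortest_names; infer_instance
def pvWitness_shortest_names : List String := (["peru", "chad", "brazil"])

def Spec_shortest_names (countries : List String) (out : List String) : Prop := out = shortest_names_alt countries
instance (countries : List String) (out : List String) : Decidable (Spec_shortest_names countries out) := by unfold Spec_shortest_names; infer_instance

-- ===== CLAIM (what is proved, stated in full; the proofs are below) =====
def Claim_equal_shortest_names : Prop := ∀ (countries : List String), Dom_shortest_names countries → Pre_shortest_names countries → Spec_shortest_names countries (shortest_names countries)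

-- ===== LEMMAS AND PROOFS =====

-- B's first pass, named for the proofs below.
def minLen (m : Int) (xs : List String) : Int :=
  xs.foldl (fun m country => min m (PySem.Str.len country)) m

theorem minLen_le (xs : List String) (m : Int) : minLen m xs ≤ m := by
  induction xs generalizing m with
  | nil => simp [minLen]
  | cons d ds ihd =>
    simp only [minLen, List.foldl_cons] at *
    exact le_trans (ihd _) (min_le_left _ _)

-- Invariant of A's fold: the list component is acc (kept only if the minimum never improved)
-- followed by the elements of xs whose length equals the overall minimum.
theorem shortestNames_fold_eq (xs : List String) (acc : List String) (m : Int) :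
    xs.foldl shortestNamesStep (acc, m) =
      ((if minLen m xs = m then acc else [])
        ++ xs.filter (fun c => PySem.Str.len c = minLen m xs), minLen m xs) := by
  induction xs generalizing acc m with
  | nil => simp [minLen]
  | cons c xs ih =>
    have hstep : minLen m (c :: xs) = minLen (min m (PySem.Str.len c)) xs := by
      simp [minLen]
    rw [hstep]
    simp only [List.foldl_cons, shortestNamesStep, PySem.Str.len_eq, String.length_toList] at *
    by_cases h1 : (c.length : Int) < m
    · -- len c < m : reset
      have hm : min m (c.length : Int) = (c.length : Int) := min_eq_right (le_of_lt h1)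
      simp only [if_pos h1, hm]
      rw [ih]
      have hle : minLen (c.length : Int) xs ≤ (c.length : Int) := minLen_le _ _
      have hne : minLen (c.length : Int) xs ≠ m := by omega
      simp only [List.filter_cons, if_neg hne]
      by_cases hc : (c.length : Int) = minLen (c.length : Int) xs
      · simp [← hc]
      · simp [hc, Ne.symm hc]
    · by_cases h2 : (c.length : Int) = m
      · -- len c = m : append
        have hm : min m (c.length : Int) = m := min_eq_left h2.ge
        simp only [if_neg h1, if_pos h2, hm]
        rw [ih]
        by_cases hEq : minLen m xs = m
        · simp [hEq, h2]
        · have hlt : minLen m xs < m := lt_of_le_of_ne (minLen_le _ _) hEq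
          have hcne : ¬ (c.length : Int) = minLen m xs := by omega
          simp [hEq, hcne]
      · -- len c > m : skip
        have hm : min m (c.length : Int) = m := min_eq_left (by omega)
        simp only [if_neg h1, if_neg h2, hm]
        rw [ih]
        have hcne : ¬ (c.length : Int) = minLen m xs := by
          have := minLen_le xs m; omega
        simp [hcne]

-- ===== VERDICT (by name: the statement is the Claim_ definition above) =====
theorem shortest_names_spec : Claim_equal_shortest_names := by
  intro countries _ hpre
  unfold Spec_shortest_names shortest_names shortest_names_alt
  cases countries with
  | nil => exact absurd rfl hpre
  | cons c0 rest =>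
    rw [PySem.List.pyGet?_zero_cons]
    simp only
    rw [shortestNames_fold_eq]
    show _ = List.filter _ _
    split_ifs <;> simp [minLen]
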